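-- pv_equiv track=rewrite | github.com/MarianC-programing/Parcial2_ada | lab7.py | suma_matriz
-- ===== SOURCE A (Python) =====
-- def suma_matriz(n):
--     """Crea una matriz de n x n y suma todos sus elementos."""
--     matriz = []
--     for i in range(n):
--         fila = []
--         for j in range(n):
--             fila.append(i + j)
--         matriz.append(fila)
--     suma = 0
--     for i in range(n):
--         for j in range(n):
--             suma += matriz[i][j]
--     return suma
-- ===== SOURCE B (Python) =====
-- def suma_matriz(n):
--     """Crea una matriz de n x n y suma todos sus elementos."""
--     return n * n * (n - 1) if n > 0 else 0
-- ===== Notes on version B (the rewrite author's own statement) =====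
-- stated objective: faster
-- what changed: Replaced the O(n^2) matrix construction and nested summation loops with the closed-form formula n^2*(n-1).
import Mathlib
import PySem

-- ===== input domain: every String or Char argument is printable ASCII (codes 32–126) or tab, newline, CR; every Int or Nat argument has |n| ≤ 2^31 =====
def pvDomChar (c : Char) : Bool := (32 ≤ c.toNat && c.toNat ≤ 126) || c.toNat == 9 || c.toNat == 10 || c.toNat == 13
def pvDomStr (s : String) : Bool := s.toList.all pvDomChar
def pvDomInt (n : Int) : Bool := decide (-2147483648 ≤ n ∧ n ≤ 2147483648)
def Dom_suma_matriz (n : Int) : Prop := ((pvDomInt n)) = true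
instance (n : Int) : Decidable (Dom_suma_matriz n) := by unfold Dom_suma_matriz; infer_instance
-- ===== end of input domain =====

-- B replaces A's O(n^2) matrix build + nested summation with the closed form n^2*(n-1) (objective: faster).
-- ===== PORT A =====
-- Literal port of A: build the n x n matrix row by row, then sum matriz[i][j] over both index loops.
def suma_matriz (n : Int) : Int :=
  let matriz : List (List Int) :=
    (PySem.List.pyRange 0 n 1).foldl
      (fun m i =>
        m ++ [(PySem.List.pyRange 0 n 1).foldl (fun fila j => fila ++ [i + j]) []]) []
  (PySem.List.pyRange 0 n 1).foldl
    (fun suma i =>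
      (PySem.List.pyRange 0 n 1).foldl
        (fun suma j => suma + PySem.List.pyGetD (PySem.List.pyGetD matriz i []) j 0) suma) 0

-- ===== PORT B =====
-- Closed form: sum_{i,j < n} (i + j) = n^2 * (n - 1).
def suma_matriz_alt (n : Int) : Int := if n > 0 then n * n * (n - 1) else 0

-- ===== PRECONDITION & SPEC =====
def Spec_suma_matriz (n : Int) (out : Int) : Prop := out = suma_matriz_alt n
instance (n : Int) (out : Int) : Decidable (Spec_suma_matriz n out) := by unfold Spec_suma_matriz; infer_instance

-- ===== CLAIM =====
def Claim_equal_suma_matriz : Prop := ∀ (n : Int), Dom_suma_matriz n → Spec_suma_matriz n (suma_matriz n)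

-- ===== LEMMAS AND PROOFS =====

-- twice the sum of 0..N-1 as integers
lemma two_mul_sum_range (N : Nat) :
    2 * ((List.range N).map (Nat.cast : Nat → Int)).sum = N * (N - 1) := by
  induction N with
  | zero => simp
  | succ k ih =>
    rw [List.range_succ, List.map_append, List.sum_append]
    simp only [List.map_cons, List.map_nil, List.sum_cons, List.sum_nil]
    push_cast
    linear_combination ih

-- the double loop reduced: sum over i of row sums
lemma suma_matriz_eq_double_sum (n : Int) :
    suma_matriz n =
      ((PySem.List.pyRange 0 n 1).map
        (fun i => ((PySem.List.pyRange 0 n 1).map (fun j => i + j)).sum)).sum := by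
  unfold suma_matriz
  rw [PySem.List.foldl_append_singleton_eq_map]
  simp only [List.nil_append]
  rw [PySem.List.foldl_congr_mem
        (g := fun suma i =>
          (PySem.List.pyRange 0 n 1).foldl (fun suma j => suma + (i + j)) suma)]
  · rw [PySem.List.foldl_congr_mem
          (g := fun suma i =>
            suma + ((PySem.List.pyRange 0 n 1).map (fun j => i + j)).sum)]
    · rw [PySem.List.foldl_add]
      simp
    · intro acc i _
      exact PySem.List.foldl_add _ _ _
  · intro acc i hi
    rw [PySem.List.foldl_congr_mem
          (g := fun suma j => suma + (i + j))]
    intro acc2 j hj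
    have hi' := (PySem.List.mem_pyRange_one).1 hi
    have hj' := (PySem.List.mem_pyRange_one).1 hj
    rw [PySem.List.pyGetD_map_pyRange_of_nonneg _ _ _ _ hi'.1 hi'.2,
        PySem.List.foldl_append_singleton_eq_map, List.nil_append,
        PySem.List.pyGetD_map_pyRange_of_nonneg _ _ _ _ hj'.1 hj'.2]

lemma suma_matriz_eval (n : Int) : suma_matriz n = suma_matriz_alt n := by
  rw [suma_matriz_eq_double_sum]
  unfold suma_matriz_alt
  by_cases h : 0 < n
  · rw [if_pos h]
    have hn : n = (n.toNat : Int) := (Int.toNat_of_nonneg h.le).symm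
    rw [hn, PySem.List.pyRange_zero_natCast]
    have h1 : ∀ (l : List Int) (i : Int),
        (l.map (fun j => i + j)).sum = (l.length : Int) * i + l.sum := by
      intro l i
      rw [PySem.List.sum_map_add_int l (fun _ => i) (fun j => j),
          PySem.List.sum_map_const_int]
      simp [mul_comm]
    simp only [h1]
    rw [PySem.List.sum_map_add_int, List.sum_map_mul_left, PySem.List.sum_map_const_int]
    simp only [List.length_map, List.length_range, List.map_id_fun', id]
    linear_combination ((n.toNat : Int)) * two_mul_sum_range n.toNat
  · rw [if_neg h, PySem.List.pyRange_one_eq_nil (by omega)]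
    simp

-- ===== VERDICT =====
theorem suma_matriz_spec : Claim_equal_suma_matriz := by
  intro n _
  exact suma_matriz_eval n
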